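-- pv_equiv track=rewrite | github.com/yndxakuzmichev-boop/new2 | ai-marketing-assistant/app/assistant.py | _resolve_campaign
-- ===== SOURCE A (Python) =====
-- def _find_campaign_by_name(campaigns: list, text: str) -> dict | None:
--     text_lower = text.lower()
--     for campaign in campaigns:
--         name = campaign.get("Name", "")
--         if name and name.lower() in text_lower:
--             return campaign
--     return None
--
-- def _find_campaign_in_history(campaigns: list, history: list) -> dict | None:
--     for msg in reversed(history):
--         text = msg.get("text", "")
--         found = _find_campaign_by_name(campaigns, text)
--         if found:
--             return found
--     return None
--
-- def _resolve_campaign(campaigns: list, user_message: str, history: list) -> dict | None: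
--     """Определяет целевую кампанию из сообщения, истории или берёт единственную."""
--     valid = [c for c in campaigns if "error" not in c and "Id" in c]
--     if not valid:
--         return None
--     found = _find_campaign_by_name(valid, user_message)
--     if found:
--         return found
--     found = _find_campaign_in_history(valid, history)
--     if found:
--         return found
--     if len(valid) == 1:
--         return valid[0]
--     return None
-- ===== SOURCE B (Python) =====
-- def _resolve_campaign(campaigns: list, user_message: str, history: list) -> dict | None:
--     valid = [c for c in campaigns if "error" not in c and "Id" in c]
--     if not valid:
--         return None
--     # text sources by priority: user message first, then history newest-first
--     texts = [user_message.lower()] + [m.get("text", "").lower() for m in reversed(history)]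
--     # score every campaign with the index of the earliest text containing its name,
--     # then take the argmin (ties on text index broken by campaign position)
--     best = None  # (text_index, campaign_index) of the best hit so far
--     for j, c in enumerate(valid):
--         name = c.get("Name", "").lower()
--         if not name:
--             continue
--         i = next((k for k, t in enumerate(texts) if name in t), None)
--         if i is not None and (best is None or i < best[0]):
--             best = (i, j)
--     if best is not None:
--         return valid[best[1]]
--     return valid[0] if len(valid) == 1 else None
-- ===== Notes on version B (the rewrite author's own statement) =====
-- stated objective: alternative
-- what changed: B loops over campaigns (not texts): it scores each valid campaign with the index of the earliest text source (user message, then history newest-first) containing its lowercased name and returns the lexicographic argmin (text index, campaign position), whereas A does a text-outer early-return nested scan through two helpers; the argmin equals A's first hit because a campaign matching the earliest hit text necessarily has that text as its own earliest hit.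
import Mathlib
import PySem

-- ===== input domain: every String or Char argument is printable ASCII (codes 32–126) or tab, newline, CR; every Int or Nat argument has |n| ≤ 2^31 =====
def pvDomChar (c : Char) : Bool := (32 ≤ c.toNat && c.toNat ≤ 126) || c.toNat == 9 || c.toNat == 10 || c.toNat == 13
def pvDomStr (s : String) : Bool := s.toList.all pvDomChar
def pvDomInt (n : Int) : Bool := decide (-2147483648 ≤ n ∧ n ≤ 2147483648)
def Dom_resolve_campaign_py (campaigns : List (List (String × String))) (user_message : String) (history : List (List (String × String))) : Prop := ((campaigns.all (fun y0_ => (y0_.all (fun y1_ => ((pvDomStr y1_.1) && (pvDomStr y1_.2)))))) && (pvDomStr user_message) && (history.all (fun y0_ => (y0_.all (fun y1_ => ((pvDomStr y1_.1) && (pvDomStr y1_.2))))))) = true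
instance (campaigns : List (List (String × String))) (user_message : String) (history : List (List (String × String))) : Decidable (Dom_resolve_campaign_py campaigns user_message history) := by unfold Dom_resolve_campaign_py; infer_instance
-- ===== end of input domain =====

-- B replaces A's text-outer early-return nested scan by a campaign-outer pass that scores
-- each valid campaign with the index of the earliest matching text source and returns the
-- lexicographic argmin; objective: alternative (same cost, different traversal).

-- shared primitive: dict.get(k, dflt) on an association list (first match)
def pyGetDStr (d : List (String × String)) (k dflt : String) : String :=
  match d.find? (fun p => p.1 == k) with
  | some p => p.2
  | none => dflt

-- key membership: 'k in d' / 'k not in d'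
def pyHasKey (d : List (String × String)) (k : String) : Bool :=
  d.any (fun p => p.1 == k)

-- ===== PORT A =====
-- loop of _find_campaign_by_name (text_lower computed once, passed as tl)
def find_by_name_go (tl : String) : List (List (String × String)) → Option (List (String × String))
  | [] => none
  | c :: rest =>
    let name := pyGetDStr c "Name" ""
    if (!(name == "")) && PySem.Str.isIn (PySem.Str.lower name) tl then some c
    else find_by_name_go tl rest

def find_campaign_by_name (campaigns : List (List (String × String))) (text : String) : Option (List (String × String)) :=
  find_by_name_go (PySem.Str.lower text) campaigns

-- loop of _find_campaign_in_history over reversed(history); 'if found:' is ported as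
-- isSome: a returned campaign has a non-empty "Name" value, hence is a non-empty dict
def find_in_history_go (campaigns : List (List (String × String))) : List (List (String × String)) → Option (List (String × String))
  | [] => none
  | m :: rest =>
    match find_campaign_by_name campaigns (pyGetDStr m "text" "") with
    | some c => some c
    | none => find_in_history_go campaigns rest

def find_campaign_in_history (campaigns : List (List (String × String))) (history : List (List (String × String))) : Option (List (String × String)) :=
  find_in_history_go campaigns history.reverse

def resolve_campaign_py (campaigns : List (List (String × String))) (user_message : String) (history : List (List (String × String))) : Option (List (String × String)) :=
  let valid := campaigns.filter (fun c => (!(pyHasKey c "error")) && pyHasKey c "Id")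
  if valid = [] then none
  else
    match find_campaign_by_name valid user_message with
    | some c => some c
    | none =>
      match find_campaign_in_history valid history with
      | some c => some c
      | none => if valid.length = 1 then valid.head? else none

-- ===== PORT B =====
-- 'i = next((k for k, t in enumerate(texts) if name in t), None)': index of the
-- earliest text containing the (already lowercased, non-empty) name
def altHit (texts : List String) (c : List (String × String)) : Option Nat :=
  if PySem.Str.lower (pyGetDStr c "Name" "") == "" then none
  else texts.findIdx? (fun t => PySem.Str.isIn (PySem.Str.lower (pyGetDStr c "Name" "")) t)

-- 'if i is not None and (best is None or i < best[0]): best = (i, j)'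
def altUpd (best : Option (Nat × Nat)) (hit : Option Nat) (j : Nat) : Option (Nat × Nat) :=
  match hit with
  | none => best
  | some i =>
    match best with
    | none => some (i, j)
    | some b => if i < b.1 then some (i, j) else some b

-- the 'for j, c in enumerate(valid)' loop accumulating best
def altScan (texts : List String) : List (List (String × String)) → Nat → Option (Nat × Nat) → Option (Nat × Nat)
  | [], _, best => best
  | c :: rest, j, best => altScan texts rest (j + 1) (altUpd best (altHit texts c) j)

def resolve_campaign_py_alt (campaigns : List (List (String × String))) (user_message : String) (history : List (List (String × String))) : Option (List (String × String)) :=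
  let valid := campaigns.filter (fun c => (!(pyHasKey c "error")) && pyHasKey c "Id")
  if valid = [] then none
  else
    let texts := PySem.Str.lower user_message :: history.reverse.map (fun m => PySem.Str.lower (pyGetDStr m "text" ""))
    match altScan texts valid 0 none with
    | some b => valid[b.2]?
    | none => if valid.length = 1 then valid.head? else none

-- ===== PRECONDITION & SPEC =====
def Spec_resolve_campaign_py (campaigns : List (List (String × String))) (user_message : String) (history : List (List (String × String))) (out : Option (List (String × String))) : Prop := out = resolve_campaign_py_alt campaigns user_message history
instance (campaigns : List (List (String × String))) (user_message : String) (history : List (List (String × String))) (out : Option (List (String × String))) : Decidable (Spec_resolve_campaign_py campaigns user_message history out) := by unfold Spec_resolve_campaign_py; infer_instance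

-- ===== CLAIM =====
def Claim_equal_resolve_campaign_py : Prop := ∀ (campaigns : List (List (String × String))) (user_message : String) (history : List (List (String × String))), Dom_resolve_campaign_py campaigns user_message history → Spec_resolve_campaign_py campaigns user_message history (resolve_campaign_py campaigns user_message history)

-- ===== LEMMAS AND PROOFS =====

-- A's per-text match test, on an already-lowered text
def mtB (t : String) (c : List (String × String)) : Bool :=
  (!(pyGetDStr c "Name" "" == "")) && PySem.Str.isIn (PySem.Str.lower (pyGetDStr c "Name" "")) t

-- A's whole search, with texts pre-lowered (reference form used in the proof)
def aScan (valid : List (List (String × String))) : List String → Option (List (String × String))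
  | [] => none
  | t :: ts =>
    match valid.find? (mtB t) with
    | some c => some c
    | none => aScan valid ts

theorem lower_empty_iff (s : String) : (PySem.Str.lower s = "") ↔ s = "" := by
  constructor <;> intro h
  · have h2 : (PySem.Str.lower s).toList = "".toList := by rw [h]
    simp only [PySem.Str.toList_lower] at h2
    have hnil : s.toList = [] := by
      cases hs : s.toList with
      | nil => rfl
      | cons a l => rw [hs] at h2; simp [PySem.Chars.lower] at h2
    exact String.toList_inj.mp (by rw [hnil]; rfl)
  · rw [h]; rfl

theorem mtB_eq (t : String) (c : List (String × String)) :
    mtB t c = ((!(PySem.Str.lower (pyGetDStr c "Name" "") == "")) &&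
      PySem.Str.isIn (PySem.Str.lower (pyGetDStr c "Name" "")) t) := by
  unfold mtB
  by_cases h : pyGetDStr c "Name" "" = ""
  · have h2 : PySem.Str.lower (pyGetDStr c "Name" "") = "" := (lower_empty_iff _).mpr h
    rw [h2, h]
  · have h2 : ¬ PySem.Str.lower (pyGetDStr c "Name" "") = "" :=
      fun hh => h ((lower_empty_iff _).mp hh)
    rw [show (pyGetDStr c "Name" "" == "") = false by simpa using h,
        show (PySem.Str.lower (pyGetDStr c "Name" "") == "") = false by simpa using h2]

-- A's by-name loop is find? with mtB, on the lowered text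
theorem find_by_name_eq_find? (t : String) (cs : List (List (String × String))) :
    find_by_name_go (PySem.Str.lower t) cs = cs.find? (mtB (PySem.Str.lower t)) := by
  induction cs with
  | nil => rfl
  | cons c rest ih =>
    show (if mtB (PySem.Str.lower t) c then some c else find_by_name_go (PySem.Str.lower t) rest)
        = List.find? (mtB (PySem.Str.lower t)) (c :: rest)
    rw [List.find?_cons]
    cases hm : mtB (PySem.Str.lower t) c
    · simpa using ih
    · rfl

-- A's history loop is aScan over the lowered history texts
theorem find_in_history_eq_aScan (valid : List (List (String × String))) (rs : List (List (String × String))) :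
    find_in_history_go valid rs = aScan valid (rs.map (fun m => PySem.Str.lower (pyGetDStr m "text" ""))) := by
  induction rs with
  | nil => simp [find_in_history_go, aScan]
  | cons m rest ih =>
    simp only [find_in_history_go, List.map_cons, aScan, find_campaign_by_name,
      find_by_name_eq_find?]
    cases valid.find? (mtB (PySem.Str.lower (pyGetDStr m "text" ""))) with
    | none => exact ih
    | some c => rfl

-- relation between mtB and altHit
theorem altHit_cons_of_mt_false (t : String) (ts : List String) (c : List (String × String))
    (h : mtB t c = false) :
    altHit (t :: ts) c = (altHit ts c).map (· + 1) := by
  unfold altHit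
  rw [mtB_eq] at h
  by_cases hn : PySem.Str.lower (pyGetDStr c "Name" "") = ""
  · simp [hn]
  · have hb : (PySem.Str.lower (pyGetDStr c "Name" "") == "") = false := by simpa using hn
    rw [hb] at h
    simp only [Bool.not_false, Bool.true_and] at h
    rw [hb]
    simp only [Bool.false_eq_true, if_false]
    rw [List.findIdx?_cons, h]
    simp

theorem altHit_cons_of_mt_true (t : String) (ts : List String) (c : List (String × String))
    (h : mtB t c = true) : altHit (t :: ts) c = some 0 := by
  unfold altHit
  rw [mtB_eq] at h
  simp only [Bool.and_eq_true, Bool.not_eq_true', beq_eq_false_iff_ne, ne_eq] at h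
  have hb : (PySem.Str.lower (pyGetDStr c "Name" "") == "") = false := by simpa using h.1
  rw [hb]
  simp only [Bool.false_eq_true, if_false]
  rw [List.findIdx?_cons, h.2]
  simp

-- once best has text-index 0, the scan never changes it
theorem altScan_zero_lock (texts : List String) (cs : List (List (String × String))) (j j0 : Nat) :
    altScan texts cs j (some (0, j0)) = some (0, j0) := by
  induction cs generalizing j with
  | nil => rfl
  | cons c rest ih =>
    show altScan texts rest (j + 1) (altUpd (some (0, j0)) (altHit texts c) j) = some (0, j0)
    have : altUpd (some (0, j0)) (altHit texts c) j = some (0, j0) := by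
      unfold altUpd
      cases altHit texts c with
      | none => rfl
      | some i => simp
    rw [this]; exact ih (j + 1)

-- shift: when every campaign misses the head text, the whole scan shifts by one
theorem altUpd_map_shift (best : Option (Nat × Nat)) (h : Option Nat) (j : Nat) :
    altUpd (best.map (fun b => (b.1 + 1, b.2))) (h.map (· + 1)) j
      = (altUpd best h j).map (fun b => (b.1 + 1, b.2)) := by
  cases h with
  | none => rfl
  | some i =>
    cases best with
    | none => rfl
    | some b =>
      simp only [Option.map_some, altUpd]
      by_cases hib : i < b.1
      · simp [hib]
      · simp [hib]

theorem altScan_shift (t : String) (ts : List String) (cs : List (List (String × String)))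
    (hall : ∀ c ∈ cs, mtB t c = false) (j : Nat) (best : Option (Nat × Nat)) :
    altScan (t :: ts) cs j (best.map (fun b => (b.1 + 1, b.2)))
      = (altScan ts cs j best).map (fun b => (b.1 + 1, b.2)) := by
  induction cs generalizing j best with
  | nil => rfl
  | cons c rest ih =>
    show altScan (t :: ts) rest (j + 1)
        (altUpd (best.map (fun b => (b.1 + 1, b.2))) (altHit (t :: ts) c) j)
      = (altScan ts rest (j + 1) (altUpd best (altHit ts c) j)).map (fun b => (b.1 + 1, b.2))
    rw [altHit_cons_of_mt_false t ts c (hall c (by simp)), altUpd_map_shift]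
    exact ih (fun c hc => hall c (by simp [hc])) (j + 1) _

-- match case: if some campaign matches the head text, the scan's winner is find?'s witness
theorem altScan_match (t : String) (ts : List String)
    (valid : List (List (String × String))) (c : List (String × String)) :
    ∀ (cs : List (List (String × String))) (j : Nat) (best : Option (Nat × Nat)),
    (∀ b, best = some b → 1 ≤ b.1) →
    (∀ k : Nat, cs[k]? = valid[j + k]?) →
    cs.find? (mtB t) = some c →
    (match altScan (t :: ts) cs j best with
      | some b => valid[b.2]?
      | none => none) = some c := by
  intro cs
  induction cs with
  | nil => intro j best _ _ hf; simp at hf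
  | cons c0 rest ih =>
    intro j best hb hidx hf
    cases hm : mtB t c0 with
    | true =>
      rw [List.find?_cons_of_pos hm] at hf
      have hc : c0 = c := Option.some.inj hf
      show (match altScan (t :: ts) rest (j + 1) (altUpd best (altHit (t :: ts) c0) j) with
        | some b => valid[b.2]? | none => none) = some c
      rw [altHit_cons_of_mt_true t ts c0 hm]
      have hupd : altUpd best (some 0) j = some (0, j) := by
        unfold altUpd
        cases hbv : best with
        | none => rfl
        | some b => simp [Nat.lt_of_lt_of_le Nat.zero_lt_one (hb b hbv)]
      rw [hupd, altScan_zero_lock]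
      have := hidx 0
      simpa [hc] using this.symm
    | false =>
      rw [List.find?_cons_of_neg (by simp [hm])] at hf
      show (match altScan (t :: ts) rest (j + 1) (altUpd best (altHit (t :: ts) c0) j) with
        | some b => valid[b.2]? | none => none) = some c
      refine ih (j + 1) (altUpd best (altHit (t :: ts) c0) j) ?_ ?_ hf
      · -- new best still has text-index ≥ 1
        intro b hbv
        rw [altHit_cons_of_mt_false t ts c0 hm] at hbv
        cases hh : altHit ts c0 with
        | none =>
          rw [hh] at hbv
          simp only [Option.map_none, altUpd] at hbv
          exact hb b hbv
        | some i =>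
          rw [hh] at hbv
          simp only [Option.map_some] at hbv
          cases hbest : best with
          | none =>
            rw [hbest] at hbv
            simp only [altUpd] at hbv
            injection hbv with e
            rw [← e]
            exact Nat.succ_le_succ (Nat.zero_le i)
          | some b0 =>
            rw [hbest] at hbv
            simp only [altUpd] at hbv
            by_cases hlt : i + 1 < b0.1
            · rw [if_pos hlt] at hbv
              injection hbv with e
              rw [← e]
              exact Nat.succ_le_succ (Nat.zero_le i)
            · rw [if_neg hlt] at hbv
              injection hbv with e
              rw [← e]
              exact hb b0 hbest
      · intro k
        have := hidx (k + 1)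
        simpa [Nat.add_comm, Nat.add_assoc, Nat.add_left_comm] using this

-- main correspondence: A's scan equals B's argmin lookup
theorem aScan_eq_altScan (texts : List String) (valid : List (List (String × String))) :
    aScan valid texts =
      (match altScan texts valid 0 none with
        | some b => valid[b.2]?
        | none => none) := by
  induction texts with
  | nil =>
    have hempty : ∀ (cs : List (List (String × String))) (j : Nat) (best : Option (Nat × Nat)),
        altScan [] cs j best = best := by
      intro cs
      induction cs with
      | nil => intro j best; rfl
      | cons c rest ih =>
        intro j best
        show altScan [] rest (j + 1) (altUpd best (altHit [] c) j) = best
        have : altHit [] c = none := by unfold altHit; split <;> rfl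
        rw [this]
        exact ih (j + 1) best
    rw [hempty]; rfl
  | cons t ts ih =>
    show (match valid.find? (mtB t) with
      | some c => some c | none => aScan valid ts) = _
    cases hf : valid.find? (mtB t) with
    | some c =>
      exact (altScan_match t ts valid c valid 0 none (by intro b h; cases h)
        (by intro k; simp) hf).symm
    | none =>
      have hall : ∀ c ∈ valid, mtB t c = false := by
        intro c hc
        have := List.find?_eq_none.mp hf c hc
        simpa using this
      have hs := altScan_shift t ts valid hall 0 none
      simp only [Option.map_none] at hs
      rw [hs]
      cases hrec : altScan ts valid 0 none with
      | none => simpa [hrec] using ih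
      | some b => simpa [hrec] using ih

-- the winning index recorded by the scan is a real position in the list
theorem altScan_index_lt (texts : List String) :
    ∀ (cs : List (List (String × String))) (j : Nat) (best : Option (Nat × Nat)) (b : Nat × Nat),
    altScan texts cs j best = some b →
    best = some b ∨ (j ≤ b.2 ∧ b.2 < j + cs.length) := by
  intro cs
  induction cs with
  | nil => intro j best b h; exact Or.inl h
  | cons c rest ih =>
    intro j best b h
    rcases ih (j + 1) (altUpd best (altHit texts c) j) b h with h1 | h2
    · cases hh : altHit texts c with
      | none =>
        rw [hh] at h1
        simp only [altUpd] at h1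
        exact Or.inl h1
      | some i =>
        rw [hh] at h1
        cases hbest : best with
        | none =>
          rw [hbest] at h1
          simp only [altUpd] at h1
          injection h1 with e
          refine Or.inr ⟨?_, ?_⟩
          · rw [← e]
          · rw [← e]
            show j < j + (c :: rest).length
            simp
        | some b0 =>
          rw [hbest] at h1
          simp only [altUpd] at h1
          by_cases hlt : i < b0.1
          · rw [if_pos hlt] at h1
            injection h1 with e
            refine Or.inr ⟨?_, ?_⟩
            · rw [← e]
            · rw [← e]
              show j < j + (c :: rest).length
              simp
          · rw [if_neg hlt] at h1
            exact Or.inl h1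
    · refine Or.inr ⟨by omega, ?_⟩
      simp only [List.length_cons]
      omega

-- ===== VERDICT =====
theorem resolve_campaign_py_spec : Claim_equal_resolve_campaign_py := by
  intro campaigns user_message history _
  unfold Spec_resolve_campaign_py resolve_campaign_py resolve_campaign_py_alt
  by_cases hv : campaigns.filter (fun c => (!(pyHasKey c "error")) && pyHasKey c "Id") = []
  · simp [hv]
  · simp only [if_neg hv]
    set valid := campaigns.filter (fun c => (!(pyHasKey c "error")) && pyHasKey c "Id") with hvdef
    set texts := PySem.Str.lower user_message ::
      history.reverse.map (fun m => PySem.Str.lower (pyGetDStr m "text" "")) with htexts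
    have hA : (match find_campaign_by_name valid user_message with
        | some c => some c
        | none => match find_campaign_in_history valid history with
          | some c => some c
          | none => if valid.length = 1 then valid.head? else none)
      = (match aScan valid texts with
        | some c => some c
        | none => if valid.length = 1 then valid.head? else none) := by
      rw [htexts]
      simp only [find_campaign_by_name, find_by_name_eq_find?, aScan,
        find_campaign_in_history, find_in_history_eq_aScan]
      cases valid.find? (mtB (PySem.Str.lower user_message)) with
      | some c => rfl
      | none =>
        cases aScan valid (history.reverse.map (fun m => PySem.Str.lower (pyGetDStr m "text" ""))) with
        | some c => rfl
        | none => rfl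
    rw [hA]
    have hEq := aScan_eq_altScan texts valid
    cases hs : altScan texts valid 0 none with
    | none =>
      have hEq2 : aScan valid texts = none := by rw [hEq, hs]
      rw [hEq2]
    | some b =>
      have hb2 : b.2 < valid.length := by
        rcases altScan_index_lt texts valid 0 none b hs with h1 | h2
        · simp at h1
        · simpa using h2.2
      have hEq2 : aScan valid texts = valid[b.2]? := by rw [hEq, hs]
      rw [hEq2, List.getElem?_eq_getElem hb2]
      show some valid[b.2] = valid[b.2]?
      exact (List.getElem?_eq_getElem hb2).symm
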